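-- pv_equiv track=rewrite | github.com/seojeong2/Algorithm | CosPro5-4.py | solution
-- ===== SOURCE A (Python) =====
-- def solution(number):
-- 	answer = ''
-- 	number_count = [0 for _ in range(10)]
-- 	while number > 0:
-- 		number_count[number % 10] += 1
-- 		number //= 10
-- 	for i in range(9,0,-1):
-- 		if number_count[i] != 0:
-- 			answer += (str(i) + str(number_count[i]))
-- 	return answer
-- ===== SOURCE B (Python) =====
-- def solution(number):
--     digits = []
--     while number > 0:
--         number, d = divmod(number, 10)
--         digits.append(d)
--     digits.sort()
--     parts = []
--     i = 0
--     n = len(digits)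
--     while i < n:
--         j = i
--         while j < n and digits[j] == digits[i]:
--             j += 1
--         if digits[i] != 0:
--             parts.append(str(digits[i]) + str(j - i))
--         i = j
--     return ''.join(reversed(parts))
-- ===== Notes on version B (the rewrite author's own statement) =====
-- stated objective: alternative
-- what changed: Replaces A's fixed-size digit-frequency array and its descending index scan by collecting the digit list, sorting it ascending and emitting run lengths from a single sorted-run scan, reversed at the end.
import Mathlib
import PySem

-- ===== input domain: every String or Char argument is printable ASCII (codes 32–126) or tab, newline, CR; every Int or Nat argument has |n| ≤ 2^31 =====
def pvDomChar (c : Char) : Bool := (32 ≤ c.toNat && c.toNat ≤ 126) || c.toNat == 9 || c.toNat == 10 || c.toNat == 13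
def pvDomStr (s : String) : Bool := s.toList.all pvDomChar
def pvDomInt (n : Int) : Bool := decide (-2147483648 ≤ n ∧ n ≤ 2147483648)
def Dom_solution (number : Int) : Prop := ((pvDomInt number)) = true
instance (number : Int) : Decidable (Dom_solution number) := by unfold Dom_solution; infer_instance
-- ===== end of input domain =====

-- B replaces A's fixed-size digit-frequency array and descending index scan by collecting the
-- digit list, sorting it and emitting run lengths from a sorted-run scan (objective: alternative).

-- ===== PORT A =====
-- the while loop of A: number_count[number % 10] += 1; number //= 10
def solutionLoop (n : Int) (cnt : List Int) : List Int :=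
  if 0 < n then
    solutionLoop (PySem.Int.floordiv n 10)
      (PySem.List.pySetD cnt (PySem.Int.mod n 10)
        (PySem.List.pyGetD cnt (PySem.Int.mod n 10) 0 + 1))
  else cnt
termination_by n.toNat
decreasing_by
  have := PySem.Int.floordiv_eq_ediv_of_pos (a := n) (b := 10) (by omega)
  rw [this]; omega

def solution (number : Int) : String :=
  let number_count := (PySem.List.pyRange 0 10 1).map (fun _ => (0 : Int))
  let cnt := solutionLoop number number_count
  (PySem.List.pyRange 9 0 (-1)).foldl (fun answer i =>
    if PySem.List.pyGetD cnt i 0 != 0 then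
      answer ++ (PySem.Int.toStr i ++ PySem.Int.toStr (PySem.List.pyGetD cnt i 0))
    else answer) ""

-- ===== PORT B =====
-- the first while loop of B: number, d = divmod(number, 10); digits.append(d)
def bDigits (n : Int) : List Int :=
  if 0 < n then PySem.Int.mod n 10 :: bDigits (PySem.Int.floordiv n 10) else []
termination_by n.toNat
decreasing_by
  have := PySem.Int.floordiv_eq_ediv_of_pos (a := n) (b := 10) (by omega)
  rw [this]; omega

-- B's nested index scan over the sorted list: the inner while advances j over the run equal
-- to digits[i] (takeWhile); i jumps to j, i.e. the rest is the dropWhile; j - i is the run length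
def bRuns : List Int → List (Int × Int)
  | [] => []
  | x :: xs =>
    (x, 1 + ((xs.takeWhile (fun y => y == x)).length : Int)) ::
      bRuns (xs.dropWhile (fun y => y == x))
termination_by l => l.length
decreasing_by
  simpa using Nat.lt_succ_of_le (List.length_dropWhile_le _ _)

def solution_alt (number : Int) : String :=
  let digits := PySem.List.sorted (bDigits number) (fun x => x) false
  let parts := (bRuns digits).foldl (fun acc dc =>
    if dc.1 != 0 then acc ++ [PySem.Int.toStr dc.1 ++ PySem.Int.toStr dc.2] else acc) []
  String.join parts.reverse

-- ===== PRECONDITION & SPEC =====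
def Spec_solution (number : Int) (out : String) : Prop := out = solution_alt number
instance (number : Int) (out : String) : Decidable (Spec_solution number out) := by unfold Spec_solution; infer_instance

-- ===== CLAIM (what is proved, stated in full; the proofs are below) =====
def Claim_equal_solution : Prop := ∀ (number : Int), Dom_solution number → Spec_solution number (solution number)

-- ===== LEMMAS AND PROOFS =====

-- common form both programs are reduced to: the digit/count pairs, descending, zero counts skipped
def outOf (c : Int → Nat) : String :=
  ([9,8,7,6,5,4,3,2,1] : List Int).foldl
    (fun acc d => if ((c d : Int) != 0) then
        acc ++ (PySem.Int.toStr d ++ PySem.Int.toStr (c d : Int))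
      else acc) ""

lemma bDigits_bound : ∀ (k : Nat) (n : Int), n.toNat ≤ k → ∀ x ∈ bDigits n, 0 ≤ x ∧ x < 10 := by
  intro k
  induction k with
  | zero =>
    intro n hn x hx
    have hnp : ¬ 0 < n := by omega
    rw [bDigits, if_neg hnp] at hx
    simp at hx
  | succ k ih =>
    intro n hn x hx
    by_cases hpos : 0 < n
    · rw [bDigits, if_pos hpos] at hx
      rcases List.mem_cons.mp hx with h | h
      · subst h
        exact ⟨PySem.Int.mod_nonneg _ (by omega), PySem.Int.mod_lt _ (by omega)⟩
      · refine ih (PySem.Int.floordiv n 10) ?_ x h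
        rw [PySem.Int.floordiv_eq_ediv_of_pos (by omega)]; omega
    · rw [bDigits, if_neg hpos] at hx; simp at hx

lemma solutionLoop_eq : ∀ (k : Nat) (n : Int), n.toNat ≤ k →
    ∀ c0 c1 c2 c3 c4 c5 c6 c7 c8 c9 : Int,
    solutionLoop n [c0,c1,c2,c3,c4,c5,c6,c7,c8,c9] =
      [c0 + ((bDigits n).count 0 : Int), c1 + ((bDigits n).count 1 : Int),
       c2 + ((bDigits n).count 2 : Int), c3 + ((bDigits n).count 3 : Int),
       c4 + ((bDigits n).count 4 : Int), c5 + ((bDigits n).count 5 : Int),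
       c6 + ((bDigits n).count 6 : Int), c7 + ((bDigits n).count 7 : Int),
       c8 + ((bDigits n).count 8 : Int), c9 + ((bDigits n).count 9 : Int)] := by
  intro k
  induction k with
  | zero =>
    intro n hn c0 c1 c2 c3 c4 c5 c6 c7 c8 c9
    have hnp : ¬ 0 < n := by omega
    rw [solutionLoop, if_neg hnp, bDigits, if_neg hnp]
    simp
  | succ k ih =>
    intro n hn c0 c1 c2 c3 c4 c5 c6 c7 c8 c9
    by_cases hpos : 0 < n
    · have hm0 := PySem.Int.mod_nonneg (a := n) (b := 10) (by omega)
      have hm10 := PySem.Int.mod_lt (a := n) (b := 10) (by omega)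
      have hrec : (PySem.Int.floordiv n 10).toNat ≤ k := by
        rw [PySem.Int.floordiv_eq_ediv_of_pos (by omega)]; omega
      rw [solutionLoop, if_pos hpos, bDigits, if_pos hpos]
      rw [PySem.Int.floordiv_eq_ediv_of_pos (show (0:Int) < 10 by norm_num)] at hrec ⊢
      have hcase : PySem.Int.mod n 10 = 0 ∨ PySem.Int.mod n 10 = 1 ∨ PySem.Int.mod n 10 = 2 ∨
          PySem.Int.mod n 10 = 3 ∨ PySem.Int.mod n 10 = 4 ∨ PySem.Int.mod n 10 = 5 ∨
          PySem.Int.mod n 10 = 6 ∨ PySem.Int.mod n 10 = 7 ∨ PySem.Int.mod n 10 = 8 ∨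
          PySem.Int.mod n 10 = 9 := by omega
      rcases hcase with h | h | h | h | h | h | h | h | h | h <;>
        rw [h] <;>
        simp only [PySem.List.pySetD, PySem.List.pySet?, PySem.List.pyIdx?,
          PySem.List.pyGetD, PySem.List.pyGet?] <;>
        norm_num [List.set, show ((2:Int).toNat = 2) from rfl, show ((3:Int).toNat = 3) from rfl, show ((4:Int).toNat = 4) from rfl, show ((5:Int).toNat = 5) from rfl, show ((6:Int).toNat = 6) from rfl, show ((7:Int).toNat = 7) from rfl, show ((8:Int).toNat = 8) from rfl, show ((9:Int).toNat = 9) from rfl] <;>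
        rw [ih _ hrec] <;>
        simp only [List.cons.injEq, and_true, true_and] <;> omega
    · have hnp := hpos
      rw [solutionLoop, if_neg hnp, bDigits, if_neg hnp]
      simp

-- the multiset of digits laid out ascending: for each d in vals, (count of d) copies of d
def canonOf (c : Int → Nat) (vals : List Int) : List Int :=
  vals.flatMap (fun d => List.replicate (c d) d)

lemma canonOf_pairwise (c : Int → Nat) : ∀ (vals : List Int), vals.Pairwise (· ≤ ·) →
    (canonOf c vals).Pairwise (· ≤ ·) := by
  intro vals
  induction vals with
  | nil => intro _; simp [canonOf]
  | cons d tl ih =>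
    intro h
    rcases List.pairwise_cons.mp h with ⟨hd, htl⟩
    simp only [canonOf, List.flatMap_cons]
    rw [List.pairwise_append]
    refine ⟨List.pairwise_replicate.mpr (Or.inr le_rfl), ih htl, ?_⟩
    intro a ha b hb
    rcases List.eq_of_mem_replicate ha with rfl
    rcases List.mem_flatMap.mp hb with ⟨d', hd', hb'⟩
    rcases List.eq_of_mem_replicate hb' with rfl
    exact hd _ hd'

lemma canonOf_count (c : Int → Nat) : ∀ (vals : List Int), vals.Nodup → ∀ v : Int,
    (canonOf c vals).count v = if v ∈ vals then c v else 0 := by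
  intro vals
  induction vals with
  | nil => intro _ v; simp [canonOf]
  | cons d tl ih =>
    intro hnd v
    rcases List.nodup_cons.mp hnd with ⟨hdtl, htl⟩
    have ih' := ih htl v
    simp only [canonOf] at ih'
    simp only [canonOf, List.flatMap_cons, List.count_append, List.count_replicate]
    rw [ih']
    by_cases hv : v = d
    · subst hv
      simp [hdtl]
    · have hne : (d == v) = false := beq_eq_false_iff_ne.mpr (Ne.symm hv)
      simp [hne, hv, List.mem_cons]

lemma take_drop_rep (d : Int) (rest : List Int) (h : ∀ y ∈ rest, y ≠ d) :
    ∀ m : Nat, ((List.replicate m d ++ rest).takeWhile (fun y => y == d) = List.replicate m d) ∧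
      ((List.replicate m d ++ rest).dropWhile (fun y => y == d) = rest) := by
  intro m
  induction m with
  | zero =>
    simp only [List.replicate_zero, List.nil_append]
    cases rest with
    | nil => simp
    | cons r rs =>
      have hr : (r == d) = false := by
        simpa using h r (by simp)
      simp [hr]
  | succ k ih =>
    simp only [List.replicate_succ, List.cons_append, List.takeWhile_cons, List.dropWhile_cons,
      BEq.rfl, if_true]
    exact ⟨by rw [ih.1], by rw [ih.2]⟩

lemma bRuns_canonOf (c : Int → Nat) : ∀ (vals : List Int), vals.Pairwise (· < ·) →
    bRuns (canonOf c vals) =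
      vals.filterMap (fun d => if c d ≠ 0 then some (d, (c d : Int)) else none) := by
  intro vals
  induction vals with
  | nil => intro _; simp [canonOf, bRuns]
  | cons d tl ih =>
    intro h
    rcases List.pairwise_cons.mp h with ⟨hd, htl⟩
    have hne : ∀ y ∈ canonOf c tl, y ≠ d := by
      intro y hy
      rcases List.mem_flatMap.mp hy with ⟨d', hd', hy'⟩
      rcases List.eq_of_mem_replicate hy' with rfl
      exact ne_of_gt (hd _ hd')
    have hcanon : canonOf c (d :: tl) = List.replicate (c d) d ++ canonOf c tl := by
      simp [canonOf]
    rw [hcanon]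
    by_cases hc : c d = 0
    · simp only [hc, List.replicate_zero, List.nil_append, List.filterMap_cons]
      simpa [hc] using ih htl
    · have hrep : List.replicate (c d) d = d :: List.replicate (c d - 1) d := by
        rcases Nat.exists_eq_succ_of_ne_zero hc with ⟨m, hm⟩
        rw [hm]
        simp [List.replicate_succ]
      rw [hrep, List.cons_append, bRuns]
      rcases take_drop_rep d (canonOf c tl) hne (c d - 1) with ⟨ht, hd'⟩
      rw [ht, hd']
      simp only [List.filterMap_cons, if_pos hc]
      refine congrArg₂ _ ?_ (ih htl)
      have : 1 ≤ c d := Nat.one_le_iff_ne_zero.mpr hc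
      simp only [List.length_replicate, Prod.mk.injEq, true_and]
      push_cast [this]
      omega

-- common step: the fold over digit/count pairs as a fold over the digit candidates
lemma foldFilter (c : Int → Nat) : ∀ (D : List Int) (a : String),
    (((D.filterMap (fun d => if c d ≠ 0 then some (d, (c d : Int)) else none)).filter
        (fun dc => dc.1 != 0)).foldl
      (fun a dc => a ++ (PySem.Int.toStr dc.1 ++ PySem.Int.toStr dc.2)) a)
    = D.foldl (fun a d =>
        if c d ≠ 0 then
          (if d ≠ 0 then a ++ (PySem.Int.toStr d ++ PySem.Int.toStr (c d : Int)) else a)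
        else a) a := by
  intro D
  induction D with
  | nil => intro a; rfl
  | cons d tl ih =>
    intro a
    by_cases hc : c d = 0
    · simp only [List.filterMap_cons, hc, ne_eq, not_true_eq_false, if_false, List.foldl_cons]
      exact ih a
    · by_cases hd : d = 0
      · subst hd
        simp only [List.filterMap_cons, if_pos hc, List.filter_cons, List.foldl_cons]
        simpa using ih a
      · have hb : (d != 0) = true := by simpa using hd
        simp only [List.filterMap_cons, if_pos hc, List.filter_cons, hb, if_true,
          List.foldl_cons]
        simp only [ne_eq, hd, not_false_eq_true, if_true]
        exact ih _

lemma outOf_step (cnt : Nat) (d : Int) (hd : d ≠ 0) (acc : String) :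
    (if cnt ≠ 0 then
        (if d ≠ 0 then acc ++ (PySem.Int.toStr d ++ PySem.Int.toStr (cnt : Int)) else acc)
      else acc) =
    (if ((cnt : Int) != 0) then
        acc ++ (PySem.Int.toStr d ++ PySem.Int.toStr (cnt : Int)) else acc) := by
  by_cases hc : cnt = 0 <;> simp [hc, hd]

lemma solution_eq (number : Int) :
    solution number = outOf (fun d => (bDigits number).count d) := by
  have key := solutionLoop_eq number.toNat number le_rfl 0 0 0 0 0 0 0 0 0 0
  have h0 : (PySem.List.pyRange 0 10 1).map (fun _ => (0:Int)) = [0,0,0,0,0,0,0,0,0,0] := by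
    decide
  have hr : PySem.List.pyRange 9 0 (-1) = [9,8,7,6,5,4,3,2,1] := by decide
  simp only [solution, h0, key, hr, zero_add, outOf]
  apply PySem.List.foldl_congr_mem
  intro acc x hx
  fin_cases hx <;>
    simp [PySem.List.pyGetD, PySem.List.pyGet?, PySem.List.pyIdx?]

lemma solution_alt_eq (number : Int) :
    solution_alt number = outOf (fun d => (bDigits number).count d) := by
  have hbound : ∀ x ∈ bDigits number, 0 ≤ x ∧ x < 10 :=
    bDigits_bound number.toNat number le_rfl
  have hsort : PySem.List.sorted (bDigits number) (fun x => x) false =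
      canonOf (fun d => (bDigits number).count d) [0,1,2,3,4,5,6,7,8,9] := by
    apply PySem.List.sorted_id_eq_of_perm_of_pairwise
    · rw [List.perm_iff_count]
      intro v
      rw [canonOf_count _ _ (by decide) v]
      by_cases hv : v ∈ ([0,1,2,3,4,5,6,7,8,9] : List Int)
      · rw [if_pos hv]
      · rw [if_neg hv]
        symm
        rw [List.count_eq_zero]
        intro hmem
        rcases hbound v hmem with ⟨h1, h2⟩
        apply hv
        simp only [List.mem_cons, List.not_mem_nil, or_false]
        omega
    · exact canonOf_pairwise _ _ (by decide)
  simp only [solution_alt, hsort,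
    bRuns_canonOf (fun d => (bDigits number).count d) [0,1,2,3,4,5,6,7,8,9] (by decide)]
  rw [show (fun (acc : List String) (dc : Int × Int) =>
        if dc.1 != 0 then acc ++ [PySem.Int.toStr dc.1 ++ PySem.Int.toStr dc.2] else acc) =
      (fun acc dc =>
        if (fun (dc : Int × Int) => dc.1 != 0) dc then
          acc ++ [(fun (dc : Int × Int) => PySem.Int.toStr dc.1 ++ PySem.Int.toStr dc.2) dc]
        else acc) from rfl,
    PySem.List.foldl_append_if]
  simp only [List.nil_append]
  rw [← List.map_reverse, ← List.filter_reverse, ← List.filterMap_reverse]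
  have hrev : ([0,1,2,3,4,5,6,7,8,9] : List Int).reverse = [9,8,7,6,5,4,3,2,1,0] := by decide
  rw [hrev]
  have hjoin : ∀ (Y : List (Int × Int)),
      String.join (Y.map (fun dc => PySem.Int.toStr dc.1 ++ PySem.Int.toStr dc.2)) =
        Y.foldl (fun a dc => a ++ (PySem.Int.toStr dc.1 ++ PySem.Int.toStr dc.2)) "" := by
    intro Y
    show (Y.map _).foldl (· ++ ·) "" = _
    rw [List.foldl_map]
  rw [hjoin, foldFilter]
  have hdrop :
      List.foldl (fun (a : String) (d : Int) =>
        if (bDigits number).count d ≠ 0 then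
          (if d ≠ 0 then
            a ++ (PySem.Int.toStr d ++ PySem.Int.toStr ((bDigits number).count d : Int))
          else a)
        else a) "" ([9,8,7,6,5,4,3,2,1,0] : List Int)
      = List.foldl (fun (a : String) (d : Int) =>
        if (bDigits number).count d ≠ 0 then
          (if d ≠ 0 then
            a ++ (PySem.Int.toStr d ++ PySem.Int.toStr ((bDigits number).count d : Int))
          else a)
        else a) "" ([9,8,7,6,5,4,3,2,1] : List Int) := by
    have h0 : ∀ x : String,
        List.foldl (fun (a : String) (d : Int) =>
          if (bDigits number).count d ≠ 0 then
            (if d ≠ 0 then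
              a ++ (PySem.Int.toStr d ++ PySem.Int.toStr ((bDigits number).count d : Int))
            else a)
          else a) x ([0] : List Int) = x := by
      intro x
      norm_num
    rw [show ([9,8,7,6,5,4,3,2,1,0] : List Int) = [9,8,7,6,5,4,3,2,1] ++ [0] from rfl,
      List.foldl_append, h0]
  rw [hdrop]
  unfold outOf
  apply PySem.List.foldl_congr_mem
  intro acc x hx
  fin_cases hx <;> exact outOf_step _ _ (by norm_num) _

-- ===== VERDICT (by name: the statement is the Claim_ definition above) =====
theorem solution_spec : Claim_equal_solution := by
  intro number _
  unfold Spec_solution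
  rw [solution_eq, solution_alt_eq]
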